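-- pv_equiv track=rewrite | github.com/WalterA/allrepo | ITSCloud-main/Python/Prima_luglio/Esercizi_obbligatori/Lezione24/Prof/codificatori_messaggio.py | _combinazione
-- ===== SOURCE A (Python) =====
-- def _combinazione(testo: str) -> str:
--     """Esegue una singola combinazione del testo."""
--     meta: int = 0
--     # se la lunghezza del testo è un numero pari, dividi il testo in due metà di lunghezza uguale
--     if len(testo) % 2 == 0:
--         meta = len(testo) // 2  # int: punto di divisione del testo, ovvero a metà.
--     else:
--         # altrimenti, se la lunghezza del testo è un numero dispari, dividi il testo in due metà, di cui, la prima metà è più lunga della seconda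
--         meta = len(testo) // 2 + 1 # il +1 fa si che in caso di lunghezza dispari di testo, la prima metà sia più lunga della seconda metà
--
--     primo: str = testo[:meta]  # str: prima metà del testo
--     secondo: str = testo[meta:]  # str: seconda metà del testo
--
--     # Combina alternando i caratteri delle due metà
--     testo_combinato: str = ""
--
--     for index in range(len(primo)): # la lunghezza di primo, per impostazione è maggiore di secondo
--         if index < len(secondo): # finchè è possibile iterare su secondo
--             testo_combinato = testo_combinato + primo[index] + secondo[index] # concatena un carattere di primo ed un carattere di secondo
--         else: # quando non è più possibile iterare su secondo
--             testo_combinato = testo_combinato + primo[index] # concatena i caratteri di primo rimanenti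
--
--     return testo_combinato
-- ===== SOURCE B (Python) =====
-- def _combinazione(testo: str) -> str:
--     """Esegue una singola combinazione del testo."""
--     meta = (len(testo) + 1) // 2
--     primo = testo[:meta]
--     secondo = testo[meta:]
--     res = [None] * len(testo)
--     res[::2] = primo
--     res[1::2] = secondo
--     return ''.join(res)
-- ===== Notes on version B (the rewrite author's own statement) =====
-- stated objective: faster
-- what changed: Replaces the per-index interleaving loop that grows a string by repeated concatenation with preallocating a result list and scattering each half into its stride via slice assignments res[::2]/res[1::2], then one join.
import Mathlib
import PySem

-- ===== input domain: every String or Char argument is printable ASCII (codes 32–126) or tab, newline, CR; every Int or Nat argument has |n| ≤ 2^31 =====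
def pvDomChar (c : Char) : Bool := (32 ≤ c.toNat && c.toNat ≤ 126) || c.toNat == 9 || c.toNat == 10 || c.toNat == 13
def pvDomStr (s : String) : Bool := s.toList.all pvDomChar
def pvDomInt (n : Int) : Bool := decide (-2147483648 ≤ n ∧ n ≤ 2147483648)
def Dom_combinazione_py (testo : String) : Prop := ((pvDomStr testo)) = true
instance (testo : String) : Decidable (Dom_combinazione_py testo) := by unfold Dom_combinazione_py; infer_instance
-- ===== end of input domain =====

-- B replaces A's per-index interleaving loop (which grows a string by concatenation)
-- by scattering the two halves into the even and odd positions of a preallocated result.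

-- ===== PORT A =====
-- literal port of _combinazione, on the code-point list of the string
def combinazione_py (testo : String) : String :=
  let t : List Char := testo.toList
  let n : Int := (t.length : Int)
  let md : Int :=
    if PySem.Int.mod n 2 = 0 then PySem.Int.floordiv n 2
    else PySem.Int.floordiv n 2 + 1
  let primo : List Char := PySem.List.slice t none (some md)
  let secondo : List Char := PySem.List.slice t (some md) none
  let res : List Char :=
    (PySem.List.pyRange 0 (primo.length : Int) 1).foldl
      (fun acc i =>
        if i < (secondo.length : Int) then
          acc ++ (PySem.List.pyGet? primo i).toList ++ (PySem.List.pyGet? secondo i).toList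
        else
          acc ++ (PySem.List.pyGet? primo i).toList)
      []
  String.ofList res

-- ===== PORT B =====
-- port of Source B: split at (n+1)//2, then fill each result position from its stride:
-- even slot j gets primo[j/2] (res[::2] = primo), odd slot j gets secondo[j/2] (res[1::2] = secondo)
def combinazione_py_alt (testo : String) : String :=
  let t : List Char := testo.toList
  let md : Nat := (t.length + 1) / 2
  let primo : List Char := t.take md
  let secondo : List Char := t.drop md
  let res : List Char :=
    (List.range t.length).map
      (fun (j : Nat) => if j % 2 = 0 then primo.getD (j / 2) ' ' else secondo.getD (j / 2) ' ')
  String.ofList res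

-- ===== PRECONDITION & SPEC =====
def Spec_combinazione_py (testo : String) (out : String) : Prop := out = combinazione_py_alt testo
instance (testo : String) (out : String) : Decidable (Spec_combinazione_py testo out) := by unfold Spec_combinazione_py; infer_instance

-- ===== CLAIM (what is proved, stated in full; the proofs are below) =====
def Claim_equal_combinazione_py : Prop := ∀ (testo : String), Dom_combinazione_py testo → Spec_combinazione_py testo (combinazione_py testo)

-- ===== LEMMAS AND PROOFS =====

-- canonical interleaving of the two halves (first half at least as long)
def pvIlv : List Char → List Char → List Char
  | [], _ => []
  | a :: p, [] => a :: p
  | a :: p, b :: s => a :: b :: pvIlv p s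

-- A's loop, reduced to a flatMap over Nat indices, is pvIlv
theorem pvA_ilv (p s : List Char) (h : s.length ≤ p.length) :
    (List.range p.length).flatMap
      (fun (i : Nat) => if ((i : Int)) < (s.length : Int) then
          (PySem.List.pyGet? p ((i : Nat) : Int)).toList ++ (PySem.List.pyGet? s ((i : Nat) : Int)).toList
        else (PySem.List.pyGet? p ((i : Nat) : Int)).toList)
      = pvIlv p s := by
  induction p generalizing s with
  | nil =>
    cases s with
    | nil => simp [pvIlv]
    | cons b s' => simp at h
  | cons a p' ih =>
    simp only [List.length_cons]
    rw [List.range_succ_eq_map]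
    cases s with
    | nil =>
      simp only [List.flatMap_cons, List.flatMap_map]
      have h0 : ¬ (((0 : Nat) : Int)) < (([] : List Char).length : Int) := by simp
      rw [if_neg h0]
      have hih := ih ([]) (by simp)
      have step : ∀ i : Nat,
          (if (((i + 1 : Nat) : Int)) < (([] : List Char).length : Int) then
            (PySem.List.pyGet? (a :: p') ((i + 1 : Nat) : Int)).toList ++ (PySem.List.pyGet? ([] : List Char) ((i + 1 : Nat) : Int)).toList
          else (PySem.List.pyGet? (a :: p') ((i + 1 : Nat) : Int)).toList)
          = (if (((i : Nat) : Int)) < (([] : List Char).length : Int) then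
            (PySem.List.pyGet? p' ((i : Nat) : Int)).toList ++ (PySem.List.pyGet? ([] : List Char) ((i : Nat) : Int)).toList
          else (PySem.List.pyGet? p' ((i : Nat) : Int)).toList) := by
        intro i; simp; intro hneg; exact absurd hneg (by omega)
      simp only [Nat.succ_eq_add_one]
      rw [List.flatMap_congr (fun i _ => step i), hih]
      cases p' <;> simp [pvIlv]
    | cons b s' =>
      simp only [List.flatMap_cons, List.flatMap_map]
      have h0 : (((0 : Nat) : Int)) < ((b :: s').length : Int) := by
        simp only [List.length_cons]; push_cast; omega
      rw [if_pos h0]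
      have hlen : s'.length ≤ p'.length := by simpa using h
      have step : ∀ i : Nat,
          (if (((i + 1 : Nat) : Int)) < ((b :: s').length : Int) then
            (PySem.List.pyGet? (a :: p') ((i + 1 : Nat) : Int)).toList ++ (PySem.List.pyGet? (b :: s') ((i + 1 : Nat) : Int)).toList
          else (PySem.List.pyGet? (a :: p') ((i + 1 : Nat) : Int)).toList)
          = (if (((i : Nat) : Int)) < (s'.length : Int) then
            (PySem.List.pyGet? p' ((i : Nat) : Int)).toList ++ (PySem.List.pyGet? s' ((i : Nat) : Int)).toList
          else (PySem.List.pyGet? p' ((i : Nat) : Int)).toList) := by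
        intro i
        have hc : ((((i + 1 : Nat) : Int)) < ((b :: s').length : Int)) ↔ ((((i : Nat) : Int)) < (s'.length : Int)) := by
          simp only [List.length_cons]; push_cast; omega
        by_cases hi : (((i : Nat) : Int)) < (s'.length : Int)
        · rw [if_pos hi, if_pos (hc.mpr hi)]; simp [PySem.List.pyGet?_natCast]
        · rw [if_neg hi, if_neg (fun hx => hi (hc.mp hx))]; simp [PySem.List.pyGet?_natCast]
      simp only [Nat.succ_eq_add_one]
      rw [List.flatMap_congr (fun i _ => step i), ih s' hlen]
      simp [pvIlv]

-- B's stride-scatter map is pvIlv too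
theorem pvB_ilv (p s : List Char) (h1 : s.length ≤ p.length) (h2 : p.length ≤ s.length + 1) :
    (List.range (p.length + s.length)).map
      (fun (j : Nat) => if j % 2 = 0 then p.getD (j / 2) ' ' else s.getD (j / 2) ' ')
      = pvIlv p s := by
  induction s generalizing p with
  | nil =>
    match p, h1, h2 with
    | [], _, _ => simp [pvIlv]
    | [a], _, _ => simp [pvIlv, List.range_succ]
  | cons b s' ih =>
    match p with
    | [] => simp at h1
    | a :: p' =>
      have e : (a :: p').length + (b :: s').length = (p'.length + s'.length) + 1 + 1 := by
        simp only [List.length_cons]; omega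
      rw [e, List.range_succ_eq_map, List.range_succ_eq_map]
      simp only [List.map_cons, List.map_map]
      have step : ∀ j : Nat,
          ((fun (j : Nat) => if j % 2 = 0 then (a :: p').getD (j / 2) ' ' else (b :: s').getD (j / 2) ' ') ∘ Nat.succ ∘ Nat.succ) j
          = (fun (j : Nat) => if j % 2 = 0 then p'.getD (j / 2) ' ' else s'.getD (j / 2) ' ') j := by
        intro j
        have hm : (j + 1 + 1) % 2 = j % 2 := by omega
        have hd : (j + 1 + 1) / 2 = j / 2 + 1 := by omega
        simp only [Function.comp, Nat.succ_eq_add_one, hm, hd]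
        by_cases hj : j % 2 = 0 <;> simp [hj]
      rw [List.map_congr_left (fun j _ => step j),
          ih p' (by simpa using h1) (by simp only [List.length_cons] at h2 ⊢; omega)]
      simp [pvIlv]

theorem combinazione_eq (testo : String) :
    combinazione_py testo = combinazione_py_alt testo := by
  unfold combinazione_py combinazione_py_alt
  dsimp only
  set t : List Char := testo.toList with ht
  have hmeta : (if PySem.Int.mod (t.length : Int) 2 = 0 then PySem.Int.floordiv (t.length : Int) 2
      else PySem.Int.floordiv (t.length : Int) 2 + 1) = (((t.length + 1) / 2 : Nat) : Int) := by
    rw [PySem.Int.mod_eq_emod_of_pos (by omega), PySem.Int.floordiv_eq_ediv_of_pos (by omega)]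
    by_cases hpar : ((t.length : Int)) % 2 = 0 <;> [rw [if_pos hpar]; rw [if_neg hpar]] <;> omega
  rw [hmeta]
  rw [PySem.List.slice_to_natCast, PySem.List.slice_from_natCast]
  set m : Nat := (t.length + 1) / 2 with hm
  have hp : (t.take m).length = min m t.length := by simp
  have hs : (t.drop m).length = t.length - m := by simp
  have hfold :
      (PySem.List.pyRange 0 ((t.take m).length : Int) 1).foldl
        (fun acc i =>
          if i < ((t.drop m).length : Int) then
            acc ++ (PySem.List.pyGet? (t.take m) i).toList ++ (PySem.List.pyGet? (t.drop m) i).toList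
          else acc ++ (PySem.List.pyGet? (t.take m) i).toList) []
      = (List.range (t.take m).length).flatMap
          (fun (i : Nat) => if ((i : Int)) < ((t.drop m).length : Int) then
              (PySem.List.pyGet? (t.take m) ((i : Nat) : Int)).toList ++ (PySem.List.pyGet? (t.drop m) ((i : Nat) : Int)).toList
            else (PySem.List.pyGet? (t.take m) ((i : Nat) : Int)).toList) := by
    rw [PySem.List.pyRange_zero_natCast]
    rw [List.foldl_map]
    have body : ∀ (acc : List Char) (i : Nat),
        (if ((i : Int)) < ((t.drop m).length : Int) then
            acc ++ (PySem.List.pyGet? (t.take m) ((i : Nat) : Int)).toList ++ (PySem.List.pyGet? (t.drop m) ((i : Nat) : Int)).toList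
          else acc ++ (PySem.List.pyGet? (t.take m) ((i : Nat) : Int)).toList)
        = acc ++ (if ((i : Int)) < ((t.drop m).length : Int) then
            (PySem.List.pyGet? (t.take m) ((i : Nat) : Int)).toList ++ (PySem.List.pyGet? (t.drop m) ((i : Nat) : Int)).toList
          else (PySem.List.pyGet? (t.take m) ((i : Nat) : Int)).toList) := by
      intro acc i; split_ifs <;> simp
    simp only [body]
    rw [PySem.List.foldl_append_eq_flatMap]
    simp
  rw [hfold, pvA_ilv _ _ (by omega)]
  have hn : t.length = (t.take m).length + (t.drop m).length := by
    rw [hp, hs]; omega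
  rw [hn, pvB_ilv _ _ (by omega) (by omega)]

-- ===== VERDICT (by name: the statement is the Claim_ definition above) =====
theorem combinazione_py_spec : Claim_equal_combinazione_py := by
  intro testo _
  unfold Spec_combinazione_py
  exact combinazione_eq testo
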